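-- pv_equiv track=rewrite | github.com/JonAnder33-prog/D-D-MultiAgent-Enviroment | EntornoDND.py | get_area_spell_coordinates
-- ===== SOURCE A (Python) =====
-- def get_area_spell_coordinates(center, radius, grid_size):
--     """
--     Given a:
--     center: position on the board (normally the position of the initial enemy)
--     radius: the area of the attack/spell
--     grid_size: the size of the board
--
--     It calculates the positions that are affected by a circular area with said radius, having said point of origin on a square board.
--     """
--     x_center, y_center = center
--     width, height = grid_size
--     affected_coords = []
--
--     for x in range(x_center - radius, x_center + radius + 1):
--         for y in range(y_center - radius, y_center + radius + 1):
--             # Check if coordinates are within grid bounds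
--             if 0 <= x < width and 0 <= y < height:
--                 distance = abs(x - x_center) + abs(y - y_center)
--                 if distance <= radius:
--                     affected_coords.append((x, y))
--
--     return affected_coords
-- ===== SOURCE B (Python) =====
-- def get_area_spell_coordinates(center, radius, grid_size):
--     """Two staged passes: first compute the clipped per-row y-span of the Manhattan
--     diamond for each x (a list of (x, lo, hi) triples), then expand the spans into
--     coordinates. No distance test; the span bounds encode it."""
--     x_center, y_center = center
--     width, height = grid_size
--     spans = []
--     x = max(0, x_center - radius)
--     stop = min(width - 1, x_center + radius)
--     while x <= stop:
--         dy = radius - abs(x - x_center)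
--         spans.append((x, max(0, y_center - dy), min(height - 1, y_center + dy)))
--         x += 1
--     affected_coords = []
--     for x, lo, hi in spans:
--         affected_coords.extend((x, y) for y in range(lo, hi + 1))
--     return affected_coords
-- ===== Notes on version B (the rewrite author's own statement) =====
-- stated objective: alternative
-- what changed: B replaces A's full (2r+1)^2 square scan with a per-cell bounds-and-distance test by a two-stage pipeline: a while loop first builds the clipped per-row y-spans of the Manhattan diamond as (x, lo, hi) triples, and a second pass expands the spans into coordinates; no distance comparison is performed, trading A's single nested scan for an intermediate span list.
import Mathlib
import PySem

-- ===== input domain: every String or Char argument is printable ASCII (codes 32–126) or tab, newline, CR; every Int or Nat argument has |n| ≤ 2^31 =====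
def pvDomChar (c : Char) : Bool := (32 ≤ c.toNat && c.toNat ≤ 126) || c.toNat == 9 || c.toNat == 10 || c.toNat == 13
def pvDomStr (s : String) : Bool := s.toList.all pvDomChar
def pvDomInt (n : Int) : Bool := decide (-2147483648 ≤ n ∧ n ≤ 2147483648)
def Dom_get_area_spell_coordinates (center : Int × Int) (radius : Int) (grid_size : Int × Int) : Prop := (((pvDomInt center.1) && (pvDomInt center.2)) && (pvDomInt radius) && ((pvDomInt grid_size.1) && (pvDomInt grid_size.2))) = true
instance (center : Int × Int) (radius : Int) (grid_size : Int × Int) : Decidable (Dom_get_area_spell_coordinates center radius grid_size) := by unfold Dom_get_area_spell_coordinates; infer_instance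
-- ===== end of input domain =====

-- B builds the clipped per-row y-spans of the Manhattan diamond in a first pass and
-- expands them into coordinates in a second, instead of A's full square scan with a
-- per-cell bounds-and-distance test; objective: alternative decomposition (no distance
-- comparison; an intermediate span list instead of A's nested scan).

-- ===== PORT A =====
def get_area_spell_coordinates (center : Int × Int) (radius : Int) (grid_size : Int × Int) : List (Int × Int) :=
  let x_center := center.1
  let y_center := center.2
  let width := grid_size.1
  let height := grid_size.2
  (PySem.List.pyRange (x_center - radius) (x_center + radius + 1) 1).foldl
    (fun acc x =>
      (PySem.List.pyRange (y_center - radius) (y_center + radius + 1) 1).foldl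
        (fun acc2 y =>
          if 0 ≤ x ∧ x < width ∧ 0 ≤ y ∧ y < height then
            let distance := |x - x_center| + |y - y_center|
            if distance ≤ radius then acc2 ++ [(x, y)] else acc2
          else acc2)
        acc)
    []

-- ===== PORT B =====
-- the while loop of Source B building the (x, lo, hi) row spans; fuel only makes the
-- recursion structural (the loop itself stops at `x > stop`)
def pv_spansB (x_center y_center radius height stop : Int) : Int → Nat → List (Int × Int × Int)
  | _, 0 => []
  | x, Nat.succ n =>
    if x ≤ stop then
      let dy := radius - |x - x_center|
      (x, max 0 (y_center - dy), min (height - 1) (y_center + dy))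
        :: pv_spansB x_center y_center radius height stop (x + 1) n
    else []

def get_area_spell_coordinates_alt (center : Int × Int) (radius : Int) (grid_size : Int × Int) : List (Int × Int) :=
  let x_center := center.1
  let y_center := center.2
  let width := grid_size.1
  let height := grid_size.2
  let start := max 0 (x_center - radius)
  let stop := min (width - 1) (x_center + radius)
  let spans := pv_spansB x_center y_center radius height stop start (stop + 1 - start).toNat
  spans.foldl
    (fun acc s => acc ++ (PySem.List.pyRange s.2.1 (s.2.2 + 1) 1).map (fun y => (s.1, y)))
    []

-- ===== PRECONDITION & SPEC =====
def Spec_get_area_spell_coordinates (center : Int × Int) (radius : Int) (grid_size : Int × Int) (out : List (Int × Int)) : Prop := out = get_area_spell_coordinates_alt center radius grid_size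
instance (center : Int × Int) (radius : Int) (grid_size : Int × Int) (out : List (Int × Int)) : Decidable (Spec_get_area_spell_coordinates center radius grid_size out) := by unfold Spec_get_area_spell_coordinates; infer_instance

-- ===== CLAIM (what is proved, stated in full; the proofs are below) =====
def Claim_equal_get_area_spell_coordinates : Prop := ∀ (center : Int × Int) (radius : Int) (grid_size : Int × Int), Dom_get_area_spell_coordinates center radius grid_size → Spec_get_area_spell_coordinates center radius grid_size (get_area_spell_coordinates center radius grid_size)

-- ===== LEMMAS AND PROOFS =====

-- filtering a unit-step range by an interval predicate is the intersected range
theorem pv_filter_pyRange_interval (a c d : Int) :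
    ∀ n : Nat, (PySem.List.pyRange a (a + n) 1).filter (fun y => decide (c ≤ y ∧ y < d))
      = PySem.List.pyRange (max a c) (min (a + n) d) 1 := by
  intro n
  induction n with
  | zero =>
      rw [PySem.List.pyRange_one_eq_nil (by omega), PySem.List.pyRange_one_eq_nil (by omega)]
      rfl
  | succ n ih =>
      have hsplit : PySem.List.pyRange a (a + (↑(n+1) : Int)) 1
          = PySem.List.pyRange a (a + n) 1 ++ [a + n] := by
        have : (a + (↑(n+1) : Int)) = (a + n) + 1 := by omega
        rw [this, PySem.List.pyRange_one_succ_right (by omega)]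
      rw [hsplit, List.filter_append, ih]
      by_cases h : c ≤ a + n ∧ a + n < d
      · have h1 : min (a + (↑(n+1) : Int)) d = min (a + n) d + 1 := by
          omega
        have h2 : min (a + n) d = a + n := by omega
        rw [h1, h2, PySem.List.pyRange_one_succ_right (by omega)]
        simp [h]
      · have hfilt : List.filter (fun y => decide (c ≤ y ∧ y < d)) [a + (n : Int)] = [] := by
          simp [List.filter, h]
        rw [hfilt, List.append_nil]
        by_cases hd : d ≤ a + n
        · have : min (a + (↑(n+1) : Int)) d = min (a + n) d := by omega
          rw [this]
        · rw [PySem.List.pyRange_one_eq_nil (by omega),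
              PySem.List.pyRange_one_eq_nil (by omega)]

theorem pv_filter_pyRange_interval' (a b c d : Int) :
    (PySem.List.pyRange a b 1).filter (fun y => decide (c ≤ y ∧ y < d))
      = PySem.List.pyRange (max a c) (min b d) 1 := by
  by_cases hab : a ≤ b
  · have h := pv_filter_pyRange_interval a c d (b - a).toNat
    have hb : a + ((b - a).toNat : Int) = b := by omega
    rwa [hb] at h
  · rw [PySem.List.pyRange_one_eq_nil (by omega), PySem.List.pyRange_one_eq_nil (by omega)]
    rfl

-- guarded flatMap = flatMap over the filtered list
theorem pv_flatMap_guard {β : Type} (p : Int → Prop) [DecidablePred p] (g : Int → List β) :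
    ∀ l : List Int, (l.flatMap (fun x => if p x then g x else []))
      = (l.filter (fun x => decide (p x))).flatMap g := by
  intro l
  induction l with
  | nil => rfl
  | cons x xs ih =>
      by_cases h : p x <;> simp [List.flatMap_cons, h, ih]

-- the span builder produces exactly the mapped x-range (with enough fuel)
theorem pv_spansB_eq (x_center y_center radius height stop : Int) :
    ∀ (n : Nat) (x : Int), (stop + 1 - x).toNat ≤ n →
      pv_spansB x_center y_center radius height stop x n
        = (PySem.List.pyRange x (stop + 1) 1).map
            (fun x => (x, max 0 (y_center - (radius - |x - x_center|)),
              min (height - 1) (y_center + (radius - |x - x_center|)))) := by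
  intro n
  induction n with
  | zero =>
      intro x hx
      rw [PySem.List.pyRange_one_eq_nil (by omega)]
      rfl
  | succ n ih =>
      intro x hx
      by_cases h : x ≤ stop
      · rw [PySem.List.pyRange_one_cons (by omega), List.map_cons]
        show pv_spansB x_center y_center radius height stop x (n+1) = _
        rw [pv_spansB, if_pos h, ih (x + 1) (by omega)]
      · rw [PySem.List.pyRange_one_eq_nil (by omega)]
        show pv_spansB x_center y_center radius height stop x (n+1) = _
        rw [pv_spansB, if_neg h, List.map_nil]

theorem get_area_spell_coordinates_eq (center : Int × Int) (radius : Int) (grid_size : Int × Int) :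
    get_area_spell_coordinates center radius grid_size
      = get_area_spell_coordinates_alt center radius grid_size := by
  obtain ⟨xc, yc⟩ := center
  obtain ⟨w, h⟩ := grid_size
  show (PySem.List.pyRange (xc - radius) (xc + radius + 1) 1).foldl _ [] = _
  -- rewrite A's inner loop into `acc ++ (filter …).map …`
  have hinner : ∀ (x : Int) (acc : List (Int × Int)),
      (PySem.List.pyRange (yc - radius) (yc + radius + 1) 1).foldl
        (fun acc2 y =>
          if 0 ≤ x ∧ x < w ∧ 0 ≤ y ∧ y < h then
            let distance := |x - xc| + |y - yc|
            if distance ≤ radius then acc2 ++ [(x, y)] else acc2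
          else acc2) acc
      = acc ++ ((PySem.List.pyRange (yc - radius) (yc + radius + 1) 1).filter
          (fun y => decide ((0 ≤ x ∧ x < w) ∧ max 0 (yc - (radius - |x - xc|)) ≤ y ∧
            y < min h (yc + (radius - |x - xc|) + 1)))).map (fun y => (x, y)) := by
    intro x acc
    have hfun : (fun (acc2 : List (Int × Int)) y =>
          if 0 ≤ x ∧ x < w ∧ 0 ≤ y ∧ y < h then
            let distance := |x - xc| + |y - yc|
            if distance ≤ radius then acc2 ++ [(x, y)] else acc2
          else acc2)
        = (fun acc2 y =>
          if (decide ((0 ≤ x ∧ x < w) ∧ max 0 (yc - (radius - |x - xc|)) ≤ y ∧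
              y < min h (yc + (radius - |x - xc|) + 1)) : Bool) then acc2 ++ [(x, y)] else acc2) := by
      funext acc2 y
      by_cases h1 : 0 ≤ x ∧ x < w ∧ 0 ≤ y ∧ y < h
      · by_cases h2 : |x - xc| + |y - yc| ≤ radius
        · have : (0 ≤ x ∧ x < w) ∧ max 0 (yc - (radius - |x - xc|)) ≤ y ∧
              y < min h (yc + (radius - |x - xc|) + 1) := by
            have hy : -(radius - |x - xc|) ≤ y - yc ∧ y - yc ≤ radius - |x - xc| :=
              abs_le.mp (by omega)
            refine ⟨⟨h1.1, h1.2.1⟩, by omega, by omega⟩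
          simp [h1, h2, this]
        · have : ¬ ((0 ≤ x ∧ x < w) ∧ max 0 (yc - (radius - |x - xc|)) ≤ y ∧
              y < min h (yc + (radius - |x - xc|) + 1)) := by
            rintro ⟨-, hy1, hy2⟩
            have hy : |y - yc| ≤ radius - |x - xc| := abs_le.mpr ⟨by omega, by omega⟩
            omega
          rw [decide_eq_false this]
          simp [h1, h2]
      · have : ¬ ((0 ≤ x ∧ x < w) ∧ max 0 (yc - (radius - |x - xc|)) ≤ y ∧
            y < min h (yc + (radius - |x - xc|) + 1)) := by
          rintro ⟨hx, hy1, hy2⟩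
          exact h1 ⟨hx.1, hx.2, by omega, by omega⟩
        rw [decide_eq_false this]
        simp [h1]
    rw [hfun, PySem.List.foldl_append_if]
  -- rewrite the whole of A as a flatMap
  have hA : (PySem.List.pyRange (xc - radius) (xc + radius + 1) 1).foldl
        (fun acc x =>
          (PySem.List.pyRange (yc - radius) (yc + radius + 1) 1).foldl
            (fun acc2 y =>
              if 0 ≤ x ∧ x < w ∧ 0 ≤ y ∧ y < h then
                let distance := |x - xc| + |y - yc|
                if distance ≤ radius then acc2 ++ [(x, y)] else acc2
              else acc2) acc) []
      = (PySem.List.pyRange (xc - radius) (xc + radius + 1) 1).flatMap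
          (fun x => if (0 ≤ x ∧ x < w) then
            ((PySem.List.pyRange (max 0 (yc - (radius - |x - xc|)))
              (min h (yc + (radius - |x - xc|) + 1)) 1).map (fun y => (x, y))) else []) := by
    have hcong := PySem.List.foldl_congr_mem
      (l := PySem.List.pyRange (xc - radius) (xc + radius + 1) 1)
      (init := ([] : List (Int × Int)))
      (f := fun acc x =>
          (PySem.List.pyRange (yc - radius) (yc + radius + 1) 1).foldl
            (fun acc2 y =>
              if 0 ≤ x ∧ x < w ∧ 0 ≤ y ∧ y < h then
                let distance := |x - xc| + |y - yc|
                if distance ≤ radius then acc2 ++ [(x, y)] else acc2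
              else acc2) acc)
      (g := fun acc x => acc ++ (if (0 ≤ x ∧ x < w) then
            ((PySem.List.pyRange (max 0 (yc - (radius - |x - xc|)))
              (min h (yc + (radius - |x - xc|) + 1)) 1).map (fun y => (x, y))) else []))
      (by
        intro acc x hx
        dsimp only
        rw [hinner x acc]
        congr 1
        have hxr : xc - radius ≤ x ∧ x < xc + radius + 1 := PySem.List.mem_pyRange_one.mp hx
        have hdy : 0 ≤ radius - |x - xc| := by
          rcases abs_cases (x - xc) with ⟨he, -⟩ | ⟨he, -⟩ <;> omega
        have hk : 0 ≤ |x - xc| := abs_nonneg _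
        by_cases hxw : 0 ≤ x ∧ x < w
        · have hp : (fun y => decide ((0 ≤ x ∧ x < w) ∧ max 0 (yc - (radius - |x - xc|)) ≤ y ∧
                y < min h (yc + (radius - |x - xc|) + 1)))
              = (fun y => decide (max 0 (yc - (radius - |x - xc|)) ≤ y ∧
                y < min h (yc + (radius - |x - xc|) + 1))) := by
            funext y; exact decide_eq_decide.mpr (by tauto)
          rw [hp, pv_filter_pyRange_interval']
          have h1 : max (yc - radius) (max 0 (yc - (radius - |x - xc|)))
              = max 0 (yc - (radius - |x - xc|)) := by omega
          have h2 : min (yc + radius + 1) (min h (yc + (radius - |x - xc|) + 1))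
              = min h (yc + (radius - |x - xc|) + 1) := by omega
          rw [h1, h2, if_pos hxw]
        · have hp : (fun y => decide ((0 ≤ x ∧ x < w) ∧ max 0 (yc - (radius - |x - xc|)) ≤ y ∧
                y < min h (yc + (radius - |x - xc|) + 1))) = (fun _ : Int => false) := by
            funext y; simp [hxw]
          rw [hp, if_neg hxw]
          simp)
    rw [hcong, PySem.List.foldl_append_eq_flatMap]
    simp
  rw [hA, pv_flatMap_guard (fun x => 0 ≤ x ∧ x < w), pv_filter_pyRange_interval']
  -- rewrite B as the same flatMap: spans = mapped x-range, then the expansion foldl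
  show _ = (pv_spansB xc yc radius h (min (w - 1) (xc + radius)) (max 0 (xc - radius))
      (min (w - 1) (xc + radius) + 1 - max 0 (xc - radius)).toNat).foldl _ []
  rw [pv_spansB_eq xc yc radius h (min (w - 1) (xc + radius)) _ (max 0 (xc - radius)) (by omega)]
  rw [List.foldl_map, PySem.List.foldl_append_eq_flatMap]
  -- align the two flatMaps: same x-range, same per-x list
  have hrange : max (xc - radius) 0 = max 0 (xc - radius) := by omega
  have hstop : min (xc + radius + 1) w = min (w - 1) (xc + radius) + 1 := by omega
  rw [hrange, hstop]
  simp only [List.nil_append]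
  apply List.flatMap_congr
  intro x hx
  have hmin : min h (yc + (radius - |x - xc|) + 1) = min (h - 1) (yc + (radius - |x - xc|)) + 1 := by
    omega
  rw [hmin]

-- ===== VERDICT (by name: the statement is the Claim_ definition above) =====
theorem get_area_spell_coordinates_spec : Claim_equal_get_area_spell_coordinates := by
  intro center radius grid_size _
  exact get_area_spell_coordinates_eq center radius grid_size
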